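-- pv_equiv track=rewrite | github.com/AgentFlocks/flocks | .flocks/plugins/skills/api-capture-cdp/scripts/generate-cli.py | group_endpoints
-- ===== SOURCE A (Python) =====
-- from typing import List, Dict, Any, Optional
--
-- def group_endpoints(requests: List[Dict]) -> Dict[str, List[Dict]]:
--     """Group endpoints by unique URL (deduped)"""
--     groups = {}
--
--     for req in requests:
--         url = req.get('url', '')
--         if not url:
--             continue
--
--         path = url.split('?')[0]
--         if path not in groups:
--             groups[path] = []
--         groups[path].append(req)
--
--     return groups
-- ===== SOURCE B (Python) =====
-- def group_endpoints(requests):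
--     """Group endpoints by unique URL (deduped): first collect the distinct paths
--     in order of first appearance, then gather each path's requests by a scan."""
--     paths = [req.get('url', '').split('?')[0] for req in requests if req.get('url', '')]
--     keys = list(dict.fromkeys(paths))
--     return {k: [req for req in requests
--                 if req.get('url', '') and req.get('url', '').split('?')[0] == k]
--             for k in keys}
-- ===== Notes on version B (the rewrite author's own statement) =====
-- stated objective: alternative
-- what changed: A builds the grouping in one pass by mutating a dict of lists; B first computes the distinct paths in first-appearance order (dict.fromkeys) and then builds each group by a separate scan of the requests.
import Mathlib
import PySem

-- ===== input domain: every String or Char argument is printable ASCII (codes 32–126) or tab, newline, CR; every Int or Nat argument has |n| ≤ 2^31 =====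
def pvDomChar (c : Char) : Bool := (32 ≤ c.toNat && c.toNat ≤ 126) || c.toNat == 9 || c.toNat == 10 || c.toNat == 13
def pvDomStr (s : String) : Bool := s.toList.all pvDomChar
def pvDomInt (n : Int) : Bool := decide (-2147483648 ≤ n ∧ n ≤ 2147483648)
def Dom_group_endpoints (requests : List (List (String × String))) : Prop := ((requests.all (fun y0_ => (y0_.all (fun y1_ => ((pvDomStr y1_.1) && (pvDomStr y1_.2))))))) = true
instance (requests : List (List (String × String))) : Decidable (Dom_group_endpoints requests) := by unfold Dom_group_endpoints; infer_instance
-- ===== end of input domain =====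

-- B groups by first collecting the distinct paths (dict.fromkeys) and then gathering each
-- path's requests with a per-key scan, instead of A's single-pass dict accumulation (alternative decomposition).


-- ===== PORT A =====
-- req.get('url', '')
def pvUrl (req : List (String × String)) : String := (PySem.Dict.mk req).getD "url" ""
-- url.split('?')[0]; the separator "?" is nonempty so split? is `some`, and split never
-- returns an empty list, so the [0] index is exactly the head (cannot raise).
def pvPath (url : String) : String := ((PySem.Str.split? url "?").getD []).headD ""

def group_endpoints (requests : List (List (String × String))) : List (String × List (List (String × String))) :=
  (requests.foldl (fun (groups : PySem.Dict String (List (List (String × String)))) req =>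
    let url := pvUrl req
    if url == "" then groups        -- 'if not url: continue'
    else
      let path := pvPath url
      let groups := if groups.contains path then groups else groups.insert path []
      groups.modify path [] (fun v => v ++ [req])   -- groups[path].append(req)
  ) PySem.Dict.empty).items

-- ===== PORT B =====
def group_endpoints_alt (requests : List (List (String × String))) : List (String × List (List (String × String))) :=
  let paths := (requests.filter (fun req => !(pvUrl req == ""))).map (fun req => pvPath (pvUrl req))
  let keys := PySem.List.dedup paths      -- list(dict.fromkeys(paths))
  keys.map (fun k => (k, requests.filter (fun req => !(pvUrl req == "") && (pvPath (pvUrl req) == k))))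

-- ===== PRECONDITION & SPEC =====
def Spec_group_endpoints (requests : List (List (String × String))) (out : List (String × List (List (String × String)))) : Prop := out = group_endpoints_alt requests
instance (requests : List (List (String × String))) (out : List (String × List (List (String × String)))) : Decidable (Spec_group_endpoints requests out) := by unfold Spec_group_endpoints; infer_instance

-- ===== CLAIM (what is proved, stated in full; the proofs are below) =====
def Claim_equal_group_endpoints : Prop := ∀ (requests : List (List (String × String))), Dom_group_endpoints requests → Spec_group_endpoints requests (group_endpoints requests)

-- ===== LEMMAS AND PROOFS =====

-- A's 'ensure key then append' step is one Dict.modify.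
theorem pv_step_modify {κ ν : Type} [BEq κ] [LawfulBEq κ]
    (d : PySem.Dict κ (List ν)) (k : κ) (r : ν) :
    (if d.contains k then d else d.insert k []).modify k [] (fun v => v ++ [r])
      = d.modify k [] (fun v => v ++ [r]) := by
  by_cases h : d.contains k
  · simp [h]
  · simp only [Bool.not_eq_true] at h
    simp [h, PySem.Dict.modify, PySem.Dict.getD_insert_self,
      PySem.Dict.insert_insert_self, PySem.Dict.getD_of_not_contains d _ h]

theorem group_endpoints_spec : Claim_equal_group_endpoints := by
  intro requests _
  unfold Spec_group_endpoints group_endpoints group_endpoints_alt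
  -- rewrite A's loop step, then fuse the skip-branch into a filter
  have hstep : (requests.foldl (fun (groups : PySem.Dict String (List (List (String × String)))) req =>
      let url := pvUrl req
      if url == "" then groups
      else
        let path := pvPath url
        let groups := if groups.contains path then groups else groups.insert path []
        groups.modify path [] (fun v => v ++ [req])) PySem.Dict.empty)
      = ((requests.filter (fun req => !(pvUrl req == ""))).foldl
          (fun groups req => groups.modify (pvPath (pvUrl req)) [] (fun v => v ++ [req]))
          PySem.Dict.empty) := by
    rw [← PySem.List.foldl_if_eq_foldl_filter]
    have hfun : (fun (groups : PySem.Dict String (List (List (String × String)))) req =>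
        let url := pvUrl req
        if url == "" then groups
        else
          let path := pvPath url
          let groups := if groups.contains path then groups else groups.insert path []
          groups.modify path [] (fun v => v ++ [req]))
      = (fun (groups : PySem.Dict String (List (List (String × String)))) req =>
          if !(pvUrl req == "") then groups.modify (pvPath (pvUrl req)) [] (fun v => v ++ [req])
          else groups) := by
      funext d req
      by_cases h : pvUrl req == ""
      · simp [h]
      · simp only [h, Bool.not_false, if_true, if_false, Bool.false_eq_true]
        exact pv_step_modify d _ req
    rw [hfun]
  rw [hstep]
  set l := requests.filter (fun req => !(pvUrl req == "")) with hl
  set F := l.foldl (fun groups req => groups.modify (pvPath (pvUrl req)) [] (fun v => v ++ [req]))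
      PySem.Dict.empty with hF
  have hkeys : F.keys = PySem.Set.ofList (l.map (fun req => pvPath (pvUrl req))) := by
    rw [hF, PySem.Dict.keys_foldl_modify_key l (fun req => pvPath (pvUrl req)) []
      (fun _ req v => v ++ [req]) PySem.Dict.empty]
    simp [PySem.Set.update_nil_left]
  have hnodup : F.keys.Nodup := by rw [hkeys]; exact PySem.Set.nodup_ofList _
  have hget : ∀ k, F.getD k [] = l.filter (fun req => pvPath (pvUrl req) == k) := by
    intro k
    rw [hF]
    have := PySem.Dict.getD_foldl_modify_append
      (l.map (fun req => (pvPath (pvUrl req), req))) PySem.Dict.empty k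
    rw [List.foldl_map] at this
    simpa [List.filter_map, Function.comp_def] using this
  rw [PySem.Dict.items_eq_map_keys F hnodup [], hkeys,
    ← PySem.List.dedup_eq_ofList]
  apply List.map_congr_left
  intro k _
  rw [hget k, hl, List.filter_filter]
  simp [Bool.and_comm]

-- ===== VERDICT (by name: the statement is the Claim_ definition above) =====
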